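-- pv_equiv track=rewrite | github.com/LminWoo99/algorithm | 격자판회문수.py | check
-- ===== SOURCE A (Python) =====
-- def check(a):
--     res=0
--     for i in range(3):
--         temp=a[i:i+5]
--         temp.reverse()
--         if temp==a[i:i+5]:
--             res+=1
--         else:
--             res+=0
--     return res
-- ===== SOURCE B (Python) =====
-- def check(a):
--     res = 0
--     for i in range(3):
--         s = a[i:i+5]
--         n = len(s)
--         if all(s[j] == s[n-1-j] for j in range(n//2)):
--             res += 1
--     return res
-- ===== Notes on version B (the rewrite author's own statement) =====
-- stated objective: simpler
-- what changed: Replaces A's reverse-the-copy-and-compare-slices test with an in-place symmetric-index (two-pointer) palindrome check over the first half of each window, with no reversal and no second slice.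
import Mathlib
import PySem

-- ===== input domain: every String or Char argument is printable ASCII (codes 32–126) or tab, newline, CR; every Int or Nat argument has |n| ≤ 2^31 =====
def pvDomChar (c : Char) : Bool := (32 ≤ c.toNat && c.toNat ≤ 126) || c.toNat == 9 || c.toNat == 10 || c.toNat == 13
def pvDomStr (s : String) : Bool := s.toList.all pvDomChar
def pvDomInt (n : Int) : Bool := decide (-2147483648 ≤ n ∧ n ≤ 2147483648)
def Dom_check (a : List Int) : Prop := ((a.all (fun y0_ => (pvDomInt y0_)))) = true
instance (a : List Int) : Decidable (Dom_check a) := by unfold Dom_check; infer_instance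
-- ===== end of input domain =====

-- B tests each window by symmetric-index comparison instead of reversing a copy and comparing slices (objective: simpler).

-- ===== PORT A =====
def check (a : List Int) : Int :=
  (PySem.List.pyRange 0 3 1).foldl
    (fun res i =>
      let temp := (PySem.List.slice a (some i) (some (i + 5))).reverse
      if temp = PySem.List.slice a (some i) (some (i + 5)) then res + 1 else res + 0)
    0

-- ===== PORT B =====
def check_alt (a : List Int) : Int :=
  (PySem.List.pyRange 0 3 1).foldl
    (fun res i =>
      let s := PySem.List.slice a (some i) (some (i + 5))
      let n : Int := (s.length : Int)
      if (PySem.List.pyRange 0 (n / 2) 1).all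
          (fun j => PySem.List.pyGet? s j == PySem.List.pyGet? s (n - 1 - j))
        then res + 1 else res)
    0

-- ===== PRECONDITION & SPEC =====
def Spec_check (a : List Int) (out : Int) : Prop := out = check_alt a
instance (a : List Int) (out : Int) : Decidable (Spec_check a out) := by unfold Spec_check; infer_instance

-- ===== CLAIM (what is proved, stated in full; the proofs are below) =====
def Claim_equal_check : Prop := ∀ (a : List Int), Dom_check a → Spec_check a (check a)

-- ===== LEMMAS AND PROOFS =====

-- For any list of length ≤ 5 (every window a[i:i+5] is such), the reverse-equality
-- test and the symmetric-index test agree.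
lemma palin_small (s : List Int) (h : s.length ≤ 5) :
    (s.reverse = s) ↔
      ((PySem.List.pyRange 0 ((s.length : Int) / 2) 1).all
        (fun j => PySem.List.pyGet? s j == PySem.List.pyGet? s ((s.length : Int) - 1 - j)) = true) := by
  match s, h with
  | [], _ => simp
  | [a], _ => simp
  | [a,b], _ =>
      simp [show PySem.List.pyRange 0 1 1 = [0] from by decide,
        PySem.List.pyGet?, PySem.List.pyIdx?]
      omega
  | [a,b,c], _ =>
      simp [show PySem.List.pyRange 0 1 1 = [0] from by decide,
        PySem.List.pyGet?, PySem.List.pyIdx?]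
      omega
  | [a,b,c,d], _ =>
      simp [show PySem.List.pyRange 0 2 1 = [0,1] from by decide,
        PySem.List.pyGet?, PySem.List.pyIdx?]
      omega
  | [a,b,c,d,e], _ =>
      simp [show PySem.List.pyRange 0 2 1 = [0,1] from by decide,
        PySem.List.pyGet?, PySem.List.pyIdx?]
      omega

lemma slice_len_le (a : List Int) (i : Int) (hi : 0 ≤ i) :
    (PySem.List.slice a (some i) (some (i + 5))).length ≤ 5 := by
  rw [PySem.List.slice_toNat a hi (by omega)]
  calc ((a.drop i.toNat).take ((i+5).toNat - i.toNat)).length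
      ≤ (i+5).toNat - i.toNat := List.length_take_le _ _
    _ ≤ 5 := by omega

lemma window_eq (a : List Int) (i : Int) (hi : 0 ≤ i) (res : Int) :
    (if (PySem.List.slice a (some i) (some (i + 5))).reverse
          = PySem.List.slice a (some i) (some (i + 5)) then res + 1 else res + 0)
    = (let s := PySem.List.slice a (some i) (some (i + 5))
       let n : Int := (s.length : Int)
       if (PySem.List.pyRange 0 (n / 2) 1).all
           (fun j => PySem.List.pyGet? s j == PySem.List.pyGet? s (n - 1 - j))
         then res + 1 else res) := by
  have h := palin_small (PySem.List.slice a (some i) (some (i + 5))) (slice_len_le a i hi)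
  simp only []
  split_ifs with h1 h2 h2
  · ring
  · exact absurd (h.mp h1) h2
  · exact absurd (h.mpr h2) h1
  · ring

-- ===== VERDICT (by name: the statement is the Claim_ definition above) =====
theorem check_spec : Claim_equal_check := by
  intro a _
  unfold Spec_check check check_alt
  rw [show PySem.List.pyRange 0 3 1 = [0, 1, 2] from by decide]
  simp only [List.foldl]
  rw [window_eq a 0 (by omega), window_eq a 1 (by omega), window_eq a 2 (by omega)]
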